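-- pv_equiv track=rewrite | github.com/PicassoSoftware/TheMatcher | reg2nfa.py | __findBracketsStartPoint
-- ===== SOURCE A (Python) =====
-- def __findBracketsStartPoint(regex, bracket):
--     regex = regex[0:bracket]
--     p = -1
--
--     for i, element in enumerate(reversed(regex)):
--         if(element == "("):
--             p = p + 1
--         elif(element == ")"):
--             p = p - 1
--
--         if (p == 0):
--             return len(regex) - i
--
--     return -1
-- ===== SOURCE B (Python) =====
-- def __findBracketsStartPoint(regex, bracket):
--     regex = regex[0:bracket]
--     stack = []
--     for i, ch in enumerate(regex):
--         if ch == "(":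
--             stack.append(i)
--         elif ch == ")":
--             if stack:
--                 stack.pop()
--     return stack[-1] + 1 if stack else -1
-- ===== Notes on version B (the rewrite author's own statement) =====
-- stated objective: alternative
-- what changed: Replaces the backward scan with a running unmatched-bracket counter by a forward scan maintaining a stack of open-bracket indices (guarded pop on ')'), returning top index + 1.
import Mathlib
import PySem

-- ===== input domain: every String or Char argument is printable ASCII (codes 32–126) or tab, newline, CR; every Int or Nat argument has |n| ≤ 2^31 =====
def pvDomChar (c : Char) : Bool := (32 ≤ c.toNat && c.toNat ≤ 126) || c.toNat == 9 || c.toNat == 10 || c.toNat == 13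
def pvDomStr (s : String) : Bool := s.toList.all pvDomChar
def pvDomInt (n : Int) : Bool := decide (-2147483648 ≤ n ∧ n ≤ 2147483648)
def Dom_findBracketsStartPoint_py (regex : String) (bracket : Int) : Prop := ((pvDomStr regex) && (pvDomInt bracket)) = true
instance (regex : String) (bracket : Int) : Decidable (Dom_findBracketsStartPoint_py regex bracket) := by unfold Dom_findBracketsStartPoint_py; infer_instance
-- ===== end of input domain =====

-- B replaces A's backward running-counter scan by a forward scan keeping a stack of
-- open-bracket indices (alternative decomposition, same O(n) cost).

-- ===== PORT A =====
-- A's loop over enumerate(reversed(regex)): chars still to process, p, i, len(regex)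
def pvALoop : List Char → Int → Int → Int → Int
  | [], _, _, _ => -1
  | c :: rest, p, i, len =>
    let p' := if c = '(' then p + 1 else if c = ')' then p - 1 else p
    if p' = 0 then len - i else pvALoop rest p' (i + 1) len

def findBracketsStartPoint_py (regex : String) (bracket : Int) : Int :=
  let l := PySem.List.slice regex.toList (some 0) (some bracket)  -- regex = regex[0:bracket]
  pvALoop l.reverse (-1) 0 (l.length : Int)

-- ===== PORT B =====
-- one step of B's forward loop: push index on '(', guarded pop on ')'
def pvBStep (st : List Int) (p : Int × Char) : List Int :=
  if p.2 = '(' then st ++ [p.1]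
  else if p.2 = ')' then (if st.isEmpty then st else st.dropLast)
  else st

def findBracketsStartPoint_py_alt (regex : String) (bracket : Int) : Int :=
  let l := PySem.List.slice regex.toList (some 0) (some bracket)  -- regex = regex[0:bracket]
  let st := (PySem.List.enumerate l 0).foldl pvBStep []
  match st.getLast? with        -- stack[-1] + 1 if stack else -1
  | some t => t + 1
  | none => -1

-- ===== PRECONDITION & SPEC =====
def Spec_findBracketsStartPoint_py (regex : String) (bracket : Int) (out : Int) : Prop := out = findBracketsStartPoint_py_alt regex bracket
instance (regex : String) (bracket : Int) (out : Int) : Decidable (Spec_findBracketsStartPoint_py regex bracket out) := by unfold Spec_findBracketsStartPoint_py; infer_instance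

-- ===== CLAIM (what is proved, stated in full; the proofs are below) =====
def Claim_equal_findBracketsStartPoint_py : Prop := ∀ (regex : String) (bracket : Int), Dom_findBracketsStartPoint_py regex bracket → Spec_findBracketsStartPoint_py regex bracket (findBracketsStartPoint_py regex bracket)

-- ===== LEMMAS AND PROOFS =====

-- shifting both i and len by 1 does not change pvALoop's result
theorem pvALoop_shift (r : List Char) : ∀ (p i len : Int),
    pvALoop r p (i + 1) (len + 1) = pvALoop r p i len := by
  induction r with
  | nil => intro p i len; rfl
  | cons c rest ih =>
    intro p i len
    simp only [pvALoop]
    by_cases h : (if c = '(' then p + 1 else if c = ')' then p - 1 else p) = 0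
    · rw [if_pos h, if_pos h]; ring
    · rw [if_neg h, if_neg h, show i + 1 + 1 = (i + 1) + 1 from by ring, ih]
theorem pvALoop_shift1 (r : List Char) (p len : Int) :
    pvALoop r p 1 (len + 1) = pvALoop r p 0 len := by
  simpa using pvALoop_shift r p 0 len
theorem pvDropLast_reverse {α : Type} (st : List α) : st.dropLast.reverse = st.reverse.tail := by
  induction st using List.reverseRecOn with
  | nil => rfl
  | append_singleton xs x _ => simp
theorem pvMain (l : List Char) : ∀ (k : Nat),
    pvALoop l.reverse (-((k : Int) + 1)) 0 (l.length : Int) =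
      (match ((PySem.List.enumerate l 0).foldl pvBStep []).reverse[k]? with
       | some t => t + 1
       | none => (-1 : Int)) := by
  induction l using List.reverseRecOn with
  | nil => intro k; simp [pvALoop, PySem.List.enumerate]
  | append_singleton xs c ih =>
    intro k
    have hst : (PySem.List.enumerate (xs ++ [c]) 0).foldl pvBStep [] =
        pvBStep ((PySem.List.enumerate xs 0).foldl pvBStep []) ((xs.length : Int), c) := by
      rw [PySem.List.enumerate_append, List.foldl_append]
      simp [PySem.List.enumerate]
    set st := (PySem.List.enumerate xs 0).foldl pvBStep [] with hstdef
    rw [hst]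
    simp only [List.reverse_append, List.reverse_singleton, List.singleton_append,
      List.length_append, List.length_singleton, pvALoop, pvBStep]
    by_cases hc : c = '('
    · subst hc
      cases k with
      | zero => norm_num [List.reverse_append]
      | succ k' =>
        have hne : -(((k' + 1 : Nat) : Int) + 1) + 1 ≠ 0 := by push_cast; omega
        norm_num [hne]
        rw [if_neg (by omega : ¬(-1 + -((k' : Nat) : Int) = 0)),
          show (-1 + -((k' : Nat) : Int)) = -(((k' : Nat) : Int) + 1) from by ring,
          pvALoop_shift1, ih k']
    · by_cases hc2 : c = ')'
      · subst hc2
        have hne : -(((k : Nat) : Int) + 1) - 1 ≠ 0 := by omega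
        norm_num [hc, hne]
        rw [if_neg (by omega : ¬(-1 + -((k : Nat) : Int) - 1 = 0)),
          show (-1 + -((k : Nat) : Int) - 1) = -(((k + 1 : Nat) : Int) + 1) from by push_cast; ring,
          pvALoop_shift1]
        have h1 := ih (k + 1)
        push_cast at h1 ⊢
        rw [h1]
        by_cases hemp : st = []
        · simp [hemp]
        · rw [if_neg hemp, pvDropLast_reverse, List.getElem?_tail]
      · have hne : -(((k : Nat) : Int) + 1) ≠ 0 := by omega
        norm_num [hc, hc2, hne]
        rw [if_neg (by omega : ¬(-1 + -((k : Nat) : Int) = 0)),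
          show (-1 + -((k : Nat) : Int)) = -(((k : Nat) : Int) + 1) from by ring,
          pvALoop_shift1, ih k]

-- ===== VERDICT (by name: the statement is the Claim_ definition above) =====
theorem findBracketsStartPoint_py_spec : Claim_equal_findBracketsStartPoint_py := by
  intro regex bracket _
  unfold Spec_findBracketsStartPoint_py findBracketsStartPoint_py findBracketsStartPoint_py_alt
  simp only [PySem.List.slice_zero_start]
  have h := pvMain (PySem.List.slice regex.toList none (some bracket)) 0
  norm_num at h
  rw [h, List.getLast?_eq_head?_reverse, List.head?_eq_getElem?]
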